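-- pv_equiv track=rewrite | github.com/DW8888/alfred | scripts/reset_unscored_jobs_state.py | prune_state
-- ===== SOURCE A (Python) =====
-- from typing import Dict, Any, Set
--
-- def prune_state(state: Dict[str, Any], job_ids: Set[int]) -> Dict[str, int]:
--     """Remove the provided job IDs from processed/queued/skipped maps."""
--     removed_counts = {"processed_jobs": 0, "queued_jobs": 0, "skipped_jobs": 0}
--     target_ids = {str(job_id) for job_id in job_ids}
--
--     for key in removed_counts.keys():
--         mapping = state.get(key)
--         if not isinstance(mapping, dict):
--             continue
--
--         for job_id in list(mapping.keys()):
--             if job_id in target_ids: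
--                 mapping.pop(job_id, None)
--                 removed_counts[key] += 1
--
--     return removed_counts
-- ===== SOURCE B (Python) =====
-- def prune_state(state, job_ids):
--     """Remove the provided job IDs from processed/queued/skipped maps.
--
--     Instead of scanning every key of every map, iterate over the job ids and
--     pop each one directly from the mapping, counting successful pops.
--     """
--     counts = {}
--     for key in ("processed_jobs", "queued_jobs", "skipped_jobs"):
--         mapping = state.get(key)
--         n = 0
--         if isinstance(mapping, dict):
--             for job_id in job_ids:
--                 if mapping.pop(str(job_id), None) is not None:
--                     n += 1
--         counts[key] = n
--     return counts
-- ===== Notes on version B (the rewrite author's own statement) =====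
-- stated objective: faster
-- what changed: Instead of snapshotting and scanning every key of each of the three maps and testing it against a set built from all job ids, B iterates directly over job_ids and pops str(job_id) from each map, counting successful pops, so the cost depends on |job_ids| rather than on the total number of keys in the maps.
import Mathlib
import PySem

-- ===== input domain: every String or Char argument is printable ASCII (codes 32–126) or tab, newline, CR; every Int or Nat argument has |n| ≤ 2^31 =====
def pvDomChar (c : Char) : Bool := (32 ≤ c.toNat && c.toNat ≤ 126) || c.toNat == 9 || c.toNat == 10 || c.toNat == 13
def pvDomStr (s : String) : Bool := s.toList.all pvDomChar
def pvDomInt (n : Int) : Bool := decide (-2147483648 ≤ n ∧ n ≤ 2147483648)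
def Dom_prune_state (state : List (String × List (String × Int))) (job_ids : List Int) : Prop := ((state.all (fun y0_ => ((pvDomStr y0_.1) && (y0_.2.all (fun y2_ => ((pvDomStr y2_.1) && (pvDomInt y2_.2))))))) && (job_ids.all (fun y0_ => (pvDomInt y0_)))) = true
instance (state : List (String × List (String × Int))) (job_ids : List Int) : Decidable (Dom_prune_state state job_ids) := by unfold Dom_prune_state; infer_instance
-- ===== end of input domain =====

-- B replaces A's scan over every key of each of the three maps (tested against a set of all
-- job-id strings) by a direct loop over job_ids that pops each id from the map and counts
-- successful pops; equivalence is about the RETURN value only (both Pythons also remove the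
-- same keys from the mappings in state in place).


-- ===== PORT A =====
def prune_state (state : List (String × List (String × Int))) (job_ids : List Int) : List (String × Int) :=
  let removed_counts : PySem.Dict String Int :=
    PySem.Dict.mk [("processed_jobs", 0), ("queued_jobs", 0), ("skipped_jobs", 0)]
  let target_ids : PySem.Set String := PySem.Set.ofList (job_ids.map PySem.Int.toStr)
  (["processed_jobs", "queued_jobs", "skipped_jobs"].foldl (fun counts key =>
      match (PySem.Dict.mk state).get? key with
      | none => counts
      | some mapping =>
        -- for job_id in list(mapping.keys()): mapping.pop(job_id, None); removed_counts[key] += 1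
        ((mapping.map Prod.fst).foldl
          (fun (st : PySem.Dict String Int × PySem.Dict String Int) job_id =>
            if target_ids.contains job_id then
              (st.1.erase job_id, st.2.modify key 0 (· + 1))
            else st)
          (PySem.Dict.mk mapping, counts)).2)
    removed_counts).items

-- ===== PORT B =====
def prune_state_alt (state : List (String × List (String × Int))) (job_ids : List Int) : List (String × Int) :=
  ["processed_jobs", "queued_jobs", "skipped_jobs"].map (fun key =>
    match (PySem.Dict.mk state).get? key with
    | none => (key, 0)
    | some mapping =>
      -- for job_id in job_ids: if mapping.pop(str(job_id), None) is not None: n += 1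
      (key, (job_ids.foldl
        (fun (st : PySem.Dict String Int × Int) job_id =>
          match st.1.pop? (PySem.Int.toStr job_id) with
          | some r => (r.2, st.2 + 1)
          | none => st)
        (PySem.Dict.mk mapping, 0)).2))

-- ===== PRECONDITION & SPEC =====
-- Pre_ only restates the dict/set representation invariants of the Python types: job_ids is a
-- Python set (distinct elements, hence distinct str forms) and each value in state is a Python
-- dict (distinct keys); association lists with duplicates do not represent any Python input.
def Pre_prune_state (state : List (String × List (String × Int))) (job_ids : List Int) : Prop :=
  (job_ids.map PySem.Int.toStr).Nodup ∧ ∀ p ∈ state, (p.2.map Prod.fst).Nodup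
instance (state : List (String × List (String × Int))) (job_ids : List Int) : Decidable (Pre_prune_state state job_ids) := by unfold Pre_prune_state; infer_instance

def pvWitness_prune_state : (List (String × List (String × Int))) × List Int :=
  ([("processed_jobs", [("1", 7), ("4", 2)]), ("queued_jobs", [("2", 3)])], [1, 2, 3])

def Spec_prune_state (state : List (String × List (String × Int))) (job_ids : List Int) (out : List (String × Int)) : Prop := out = prune_state_alt state job_ids
instance (state : List (String × List (String × Int))) (job_ids : List Int) (out : List (String × Int)) : Decidable (Spec_prune_state state job_ids out) := by unfold Spec_prune_state; infer_instance

-- ===== CLAIM =====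
def Claim_equal_prune_state : Prop := ∀ (state : List (String × List (String × Int))) (job_ids : List Int), Dom_prune_state state job_ids → Pre_prune_state state job_ids → Spec_prune_state state job_ids (prune_state state job_ids)

-- ===== LEMMAS AND PROOFS =====

-- The number of removals both programs record for one key, as a count over that key's mapping.
def pvCnt (state : List (String × List (String × Int))) (job_ids : List Int) (key : String) : Int :=
  match (PySem.Dict.mk state).get? key with
  | none => 0
  | some mapping =>
    ((mapping.map Prod.fst).countP (fun j => decide (j ∈ job_ids.map PySem.Int.toStr)) : Int)
theorem modifyModify (d : PySem.Dict String Int) (k : String) (f g : Int → Int) :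
    (d.modify k 0 f).modify k 0 g = d.modify k 0 (fun v => g (f v)) := by
  simp only [PySem.Dict.modify]
  rw [PySem.Dict.getD_insert_self, PySem.Dict.insert_insert_self]

theorem mapReplaceSelf (items : List (String × Int)) (k : String) (v : Int)
    (hnd : (items.map Prod.fst).Nodup)
    (h : (items.find? (fun p => p.1 == k)).map (·.2) = some v) :
    items.map (fun p => if p.1 == k then (k, v) else p) = items := by
  induction items with
  | nil => simp at h
  | cons p rest ih =>
    by_cases hp : p.1 = k
    · have hb : (p.1 == k) = true := beq_iff_eq.mpr hp
      simp only [List.find?_cons, hb] at h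
      simp only [Option.map_some, Option.some.injEq] at h
      have hk : k ∉ rest.map Prod.fst := by
        rw [← hp]; exact (List.nodup_cons.mp hnd).1
      have htail : rest.map (fun p => if p.1 == k then (k, v) else p) = rest := by
        conv_rhs => rw [← List.map_id rest]
        apply List.map_congr_left
        intro q hq
        have hq1 : ¬ (q.1 == k) = true := by
          simp only [beq_iff_eq]
          intro he; exact hk (he ▸ List.mem_map_of_mem hq)
        simp [hq1]
      simp only [List.map_cons, hb, if_true, htail]
      exact List.cons_eq_cons.mpr ⟨by rw [← hp, ← h], rfl⟩
    · have hb : (p.1 == k) = false := by simp [hp]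
      simp only [List.find?_cons, hb] at h
      simp only [List.map_cons, hb, Bool.false_eq_true, if_false]
      rw [ih (List.nodup_cons.mp hnd).2 h]

theorem insertSelf (d : PySem.Dict String Int) (k : String) (v : Int)
    (hnd : d.keys.Nodup) (h : d.get? k = some v) : d.insert k v = d := by
  obtain ⟨items⟩ := d
  apply PySem.Dict.ext
  simp only [PySem.Dict.keys] at hnd
  simp only [PySem.Dict.get?] at h
  simp only [PySem.Dict.insert, PySem.Dict.contains]
  have hc : items.any (fun p => p.1 == k) = true := by
    cases hf : items.find? (fun p => p.1 == k) with
    | none => rw [hf] at h; simp at h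
    | some q =>
      have hq := List.find?_some hf
      have hm := List.mem_of_find?_eq_some hf
      exact List.any_eq_true.mpr ⟨q, hm, hq⟩
  rw [if_pos hc]
  exact mapReplaceSelf items k v hnd h

theorem modifyZero (d : PySem.Dict String Int) (k : String)
    (hnd : d.keys.Nodup) (hc : d.contains k = true) : d.modify k 0 (· + 0) = d := by
  have h : ∃ v, d.get? k = some v := by
    rw [PySem.Dict.contains_eq_isSome_get?] at hc
    exact Option.isSome_iff_exists.mp hc
  obtain ⟨v, hv⟩ := h
  simp only [PySem.Dict.modify, PySem.Dict.getD_eq_get?_getD, hv, Option.getD_some, add_zero]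
  exact insertSelf d k v hnd hv

theorem containsErase (d : PySem.Dict String Int) (k k' : String) (h : k' ≠ k) :
    (d.erase k).contains k' = d.contains k' := by
  obtain ⟨items⟩ := d
  simp only [PySem.Dict.erase, PySem.Dict.contains, List.any_filter]
  have : (fun (x : String × Int) => (!(x.1 == k)) && (x.1 == k')) = (fun p => p.1 == k') := by
    funext p
    by_cases hp : p.1 = k'
    · subst hp; simp [h]
    · simp [hp]
  rw [this]

theorem sndFoldA (keysl : List String) (key : String) (tset : PySem.Set String)
    (m counts : PySem.Dict String Int) :
    ((keysl.foldl
        (fun (st : PySem.Dict String Int × PySem.Dict String Int) j =>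
          if tset.contains j then (st.1.erase j, st.2.modify key 0 (· + 1)) else st)
        (m, counts)).2)
    = keysl.foldl (fun c j => if tset.contains j then c.modify key 0 (· + 1) else c) counts := by
  induction keysl generalizing m counts with
  | nil => rfl
  | cons x xs ih =>
    simp only [List.foldl_cons]
    by_cases h : tset.contains x = true
    · rw [if_pos h, if_pos h]; exact ih _ _
    · rw [if_neg h, if_neg h]; exact ih _ _

theorem foldlModifyCount (keysl : List String) (key : String) (p : String → Bool)
    (counts : PySem.Dict String Int) (hnd : counts.keys.Nodup) (hk : counts.contains key = true) :
    keysl.foldl (fun c j => if p j then c.modify key 0 (· + 1) else c) counts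
    = counts.modify key 0 (· + (keysl.countP p : Int)) := by
  induction keysl generalizing counts with
  | nil =>
    simp only [List.foldl_nil, List.countP_nil, Nat.cast_zero]
    exact (modifyZero counts key hnd hk).symm
  | cons x xs ih =>
    by_cases h : p x = true
    · simp only [List.foldl_cons, if_pos h]
      rw [ih _ (by simp only [PySem.Dict.modify]; exact PySem.Dict.nodup_keys_insert _ _ _ hnd)
             (by rw [PySem.Dict.contains_modify]; simp), modifyModify]
      simp only [List.countP_cons, h]
      congr 1
      funext w
      push_cast
      ring
    · simp only [List.foldl_cons, List.countP_cons, h, Bool.false_eq_true, if_false,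
        Nat.add_zero]
      exact ih _ hnd hk

theorem foldB (l : List Int) (d : PySem.Dict String Int) (n : Int)
    (hl : (l.map PySem.Int.toStr).Nodup) :
    ((l.foldl
        (fun (st : PySem.Dict String Int × Int) j =>
          match st.1.pop? (PySem.Int.toStr j) with
          | some r => (r.2, st.2 + 1)
          | none => st)
        (d, n)).2)
    = n + (l.countP (fun j => d.contains (PySem.Int.toStr j)) : Int) := by
  simp only [PySem.Dict.pop?]
  induction l generalizing d n with
  | nil => simp
  | cons j rest ih =>
    rw [List.map_cons, List.nodup_cons] at hl
    obtain ⟨hns, hnd⟩ := hl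
    cases hc : d.contains (PySem.Int.toStr j) with
    | false =>
      have hg : d.get? (PySem.Int.toStr j) = none :=
        (PySem.Dict.get?_eq_none_iff_contains d _).mpr hc
      simp only [List.foldl_cons, hg, Option.map_none]
      rw [ih d n hnd]
      simp [hc]
    | true =>
      have hg : ∃ v, d.get? (PySem.Int.toStr j) = some v := by
        rw [PySem.Dict.contains_eq_isSome_get?] at hc
        exact Option.isSome_iff_exists.mp hc
      obtain ⟨v, hv⟩ := hg
      simp only [List.foldl_cons, hv, Option.map_some]
      rw [ih _ _ hnd]
      have hcong : rest.countP (fun j' => (d.erase (PySem.Int.toStr j)).contains (PySem.Int.toStr j'))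
          = rest.countP (fun j' => d.contains (PySem.Int.toStr j')) := by
        apply List.countP_congr
        intro x hx
        rw [containsErase]
        intro he
        exact hns (he ▸ List.mem_map_of_mem hx)
      rw [hcong]
      simp only [List.countP_cons, hc]
      push_cast
      ring

theorem countPMemComm (A B : List String) (hA : A.Nodup) (hB : B.Nodup) :
    A.countP (fun a => decide (a ∈ B)) = B.countP (fun b => decide (b ∈ A)) := by
  rw [List.countP_eq_length_filter, List.countP_eq_length_filter]
  apply List.Perm.length_eq
  refine (List.perm_ext_iff_of_nodup (hA.filter _) (hB.filter _)).2 ?_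
  intro a
  simp only [List.mem_filter, decide_eq_true_eq]
  exact and_comm

theorem stepA (state : List (String × List (String × Int))) (job_ids : List Int) (key : String)
    (counts : PySem.Dict String Int) (hnd : counts.keys.Nodup) (hc : counts.contains key = true) :
    (match (PySem.Dict.mk state).get? key with
     | none => counts
     | some mapping =>
       ((mapping.map Prod.fst).foldl
         (fun (st : PySem.Dict String Int × PySem.Dict String Int) job_id =>
           if (PySem.Set.ofList (job_ids.map PySem.Int.toStr)).contains job_id then
             (st.1.erase job_id, st.2.modify key 0 (· + 1))
           else st)
         (PySem.Dict.mk mapping, counts)).2)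
    = counts.modify key 0 (· + pvCnt state job_ids key) := by
  unfold pvCnt
  cases hm : (PySem.Dict.mk state).get? key with
  | none => exact (modifyZero counts key hnd hc).symm
  | some mapping =>
    dsimp only
    rw [sndFoldA, foldlModifyCount _ _ _ _ hnd hc]
    have hfun : (PySem.Set.ofList (job_ids.map PySem.Int.toStr)).contains
        = (fun j => decide (j ∈ job_ids.map PySem.Int.toStr)) := by
      funext j
      rw [PySem.Set.contains, List.contains_eq_mem]
      simp [PySem.Set.mem_ofList]
    rw [hfun]

theorem stepB (state : List (String × List (String × Int))) (job_ids : List Int) (key : String)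
    (hl : (job_ids.map PySem.Int.toStr).Nodup)
    (hmaps : ∀ p ∈ state, (p.2.map Prod.fst).Nodup) :
    (match (PySem.Dict.mk state).get? key with
     | none => (key, (0 : Int))
     | some mapping =>
       (key, (job_ids.foldl
         (fun (st : PySem.Dict String Int × Int) job_id =>
           match st.1.pop? (PySem.Int.toStr job_id) with
           | some r => (r.2, st.2 + 1)
           | none => st)
         (PySem.Dict.mk mapping, 0)).2))
    = (key, pvCnt state job_ids key) := by
  unfold pvCnt
  cases hm : (PySem.Dict.mk state).get? key with
  | none => rfl
  | some mapping =>
    dsimp only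
    have hndm : (mapping.map Prod.fst).Nodup := by
      have hmem := PySem.Dict.mem_items_of_get?_eq_some _ hm
      exact hmaps (key, mapping) hmem
    rw [foldB _ _ _ hl, zero_add]
    have h1 : (fun j => (PySem.Dict.mk mapping).contains (PySem.Int.toStr j))
        = (fun s => decide (s ∈ mapping.map Prod.fst)) ∘ PySem.Int.toStr := by
      funext j
      rw [PySem.Dict.contains_eq_decide_mem_keys]
      rfl
    rw [h1, ← List.countP_map, countPMemComm _ _ hl hndm]

theorem A_eq (state : List (String × List (String × Int))) (job_ids : List Int) :
    prune_state state job_ids =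
      [("processed_jobs", pvCnt state job_ids "processed_jobs"),
       ("queued_jobs", pvCnt state job_ids "queued_jobs"),
       ("skipped_jobs", pvCnt state job_ids "skipped_jobs")] := by
  unfold prune_state
  simp only [List.foldl_cons, List.foldl_nil]
  rw [stepA state job_ids "processed_jobs" _ (by decide) (by decide)]
  rw [stepA state job_ids "queued_jobs" _
    (by simp only [PySem.Dict.modify]; exact PySem.Dict.nodup_keys_insert _ _ _ (by decide))
    (by rw [PySem.Dict.contains_modify]; simp)]
  rw [stepA state job_ids "skipped_jobs" _
    (by simp only [PySem.Dict.modify]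
        exact PySem.Dict.nodup_keys_insert _ _ _
          (PySem.Dict.nodup_keys_insert _ _ _ (by decide)))
    (by rw [PySem.Dict.contains_modify, PySem.Dict.contains_modify]; simp)]
  simp [PySem.Dict.modify, PySem.Dict.insert, PySem.Dict.getD, PySem.Dict.get?,
    PySem.Dict.contains]

theorem B_eq (state : List (String × List (String × Int))) (job_ids : List Int)
    (h : Pre_prune_state state job_ids) :
    prune_state_alt state job_ids =
      [("processed_jobs", pvCnt state job_ids "processed_jobs"),
       ("queued_jobs", pvCnt state job_ids "queued_jobs"),
       ("skipped_jobs", pvCnt state job_ids "skipped_jobs")] := by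
  obtain ⟨hl, hmaps⟩ := h
  unfold prune_state_alt
  simp only [List.map_cons, List.map_nil]
  rw [stepB state job_ids "processed_jobs" hl hmaps,
      stepB state job_ids "queued_jobs" hl hmaps,
      stepB state job_ids "skipped_jobs" hl hmaps]

-- ===== VERDICT =====
theorem prune_state_spec : Claim_equal_prune_state := by
  intro state job_ids _dom hpre
  unfold Spec_prune_state
  rw [A_eq, B_eq state job_ids hpre]
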